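-- pv_equiv track=rewrite | github.com/Jairdeveloper/Telegram-group-manager | app/ops/services.py | _parse_logs_args
-- ===== SOURCE A (Python) =====
-- from typing import Any, Callable, Dict, Iterable, Optional, Sequence, Tuple
--
-- def _parse_logs_args(args: Sequence[str]) -> Tuple[int, Optional[int], Optional[int]]:
--     limit = 20
--     chat_id = None
--     update_id = None
--
--     i = 0
--     while i < len(args):
--         token = args[i].strip().lower()
--         if token.isdigit():
--             limit = int(token)
--             i += 1
--             continue
--         if token == "chat" and i + 1 < len(args) and args[i + 1].strip().lstrip("-").isdigit():
--             chat_id = int(args[i + 1])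
--             i += 2
--             continue
--         if token == "update" and i + 1 < len(args) and args[i + 1].strip().lstrip("-").isdigit():
--             update_id = int(args[i + 1])
--             i += 2
--             continue
--         i += 1
--
--     limit = max(1, min(limit, 200))
--     return limit, chat_id, update_id
-- ===== SOURCE B (Python) =====
-- def _parse_logs_args(args):
--     limit = 20
--     chat_id = None
--     update_id = None
--     pending = None  # None, "chat" or "update"
--
--     for raw in args:
--         token = raw.strip().lower()
--         if pending is not None and raw.strip().lstrip("-").isdigit():
--             if pending == "chat":
--                 chat_id = int(raw)
--             else:
--                 update_id = int(raw)
--             pending = None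
--             continue
--         pending = None
--         if token.isdigit():
--             limit = int(token)
--         elif token in ("chat", "update"):
--             pending = token
--
--     return max(1, min(limit, 200)), chat_id, update_id
-- ===== Notes on version B (the rewrite author's own statement) =====
-- stated objective: idiomatic
-- what changed: Replaced A's index-based while loop with one- or two-step advances and next-element lookahead by a single forward for-loop state machine that carries a 'pending' marker ('chat'/'update') and consumes or re-dispatches the following token.
import Mathlib
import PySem

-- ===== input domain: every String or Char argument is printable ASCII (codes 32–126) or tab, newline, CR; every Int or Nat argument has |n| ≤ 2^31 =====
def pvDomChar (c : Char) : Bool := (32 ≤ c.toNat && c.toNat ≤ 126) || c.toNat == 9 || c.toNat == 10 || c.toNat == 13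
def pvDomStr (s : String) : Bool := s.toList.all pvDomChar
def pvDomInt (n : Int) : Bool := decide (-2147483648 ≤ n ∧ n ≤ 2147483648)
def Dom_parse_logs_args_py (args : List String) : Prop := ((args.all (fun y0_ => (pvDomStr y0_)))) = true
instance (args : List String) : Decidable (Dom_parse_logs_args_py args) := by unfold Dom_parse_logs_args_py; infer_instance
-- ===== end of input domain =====

-- B replaces A's index-lookahead while-loop by a single forward pass with a `pending` state (idiomatic state machine); return value only, no mutation.


-- ===== PORT A =====
-- raw.strip().lstrip("-").isdigit(): lstrip with the single-char set "-" is exactly dropWhile (· == '-') (hand port, exact)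
def pvValOk (raw : String) : Bool :=
  PySem.Chars.strIsdigit (List.dropWhile (fun c => c == '-') (PySem.Chars.strip raw.toList))

-- int(raw); under Pre_ the parse never fails (Python raises ValueError exactly where ofStr? is none)
def pvToInt (raw : String) : Int := (PySem.Int.ofStr? raw).getD 0

-- the while-loop of A on the remaining suffix args[i:], with its one- or two-step advance
def pvLoopA : List String → Int → Option Int → Option Int → Int × Option Int × Option Int
  | [], limit, chat, upd => (limit, chat, upd)
  | [raw], limit, chat, upd =>
    -- token = args[i].strip().lower()
    if PySem.Str.strIsdigit (PySem.Str.lower (PySem.Str.strip raw)) then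
      pvLoopA [] (pvToInt (PySem.Str.lower (PySem.Str.strip raw))) chat upd
    else pvLoopA [] limit chat upd
  | raw :: next :: rest, limit, chat, upd =>
    if PySem.Str.strIsdigit (PySem.Str.lower (PySem.Str.strip raw)) then
      pvLoopA (next :: rest) (pvToInt (PySem.Str.lower (PySem.Str.strip raw))) chat upd
    else if PySem.Str.lower (PySem.Str.strip raw) == "chat" && pvValOk next then
      pvLoopA rest limit (some (pvToInt next)) upd
    else if PySem.Str.lower (PySem.Str.strip raw) == "update" && pvValOk next then
      pvLoopA rest limit chat (some (pvToInt next))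
    else pvLoopA (next :: rest) limit chat upd

def parse_logs_args_py (args : List String) : Int × Option Int × Option Int :=
  match pvLoopA args 20 none none with
  | (limit, chat, upd) => (max 1 (min limit 200), chat, upd)

-- ===== PORT B =====
-- dispatch of a token when no pending marker consumes it (the tail of B's loop body)
def pvDispatchB (limit : Int) (chat upd : Option Int) (token : String) :
    Int × Option Int × Option Int × Option String :=
  if PySem.Str.strIsdigit token then (pvToInt token, chat, upd, none)
  else if token == "chat" || token == "update" then (limit, chat, upd, some token)
  else (limit, chat, upd, none)

-- one step of B's forward state machine; state = (limit, chat_id, update_id, pending)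
def pvStepB (st : Int × Option Int × Option Int × Option String) (raw : String) :
    Int × Option Int × Option Int × Option String :=
  match st with
  | (limit, chat, upd, pending) =>
    match pending with
    | some p =>
      if pvValOk raw then
        if p == "chat" then (limit, some (pvToInt raw), upd, none)
        else (limit, chat, some (pvToInt raw), none)
      else pvDispatchB limit chat upd (PySem.Str.lower (PySem.Str.strip raw))
    | none => pvDispatchB limit chat upd (PySem.Str.lower (PySem.Str.strip raw))

def parse_logs_args_py_alt (args : List String) : Int × Option Int × Option Int :=
  match args.foldl pvStepB (20, none, none, none) with
  | (limit, chat, upd, _) => (max 1 (min limit 200), chat, upd)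

-- ===== PRECONDITION & SPEC =====
-- Pre_ excludes exactly the inputs on which A raises ValueError: a "chat"/"update" token followed by a
-- value that passes the lstrip("-").isdigit() check but has two or more leading '-' (e.g. "--5"), where int() fails.
def pvBadPair (x y : String) : Bool :=
  let tx := PySem.Str.lower (PySem.Str.strip x)
  (tx == "chat" || tx == "update") && pvValOk y &&
    (List.take 2 (PySem.Chars.strip y.toList) == ['-', '-'])

def Pre_parse_logs_args_py (args : List String) : Prop :=
  ((args.zip args.tail).all (fun p => !(pvBadPair p.1 p.2))) = true
instance (args : List String) : Decidable (Pre_parse_logs_args_py args) := by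
  unfold Pre_parse_logs_args_py; infer_instance

def pvWitness_parse_logs_args_py : List String := ["5", "chat", "-42", "update", " 7 ", "x"]

def Spec_parse_logs_args_py (args : List String) (out : Int × Option Int × Option Int) : Prop := out = parse_logs_args_py_alt args
instance (args : List String) (out : Int × Option Int × Option Int) : Decidable (Spec_parse_logs_args_py args out) := by unfold Spec_parse_logs_args_py; infer_instance

-- ===== CLAIM (what is proved, stated in full; the proofs are below) =====
def Claim_equal_parse_logs_args_py : Prop := ∀ (args : List String), Dom_parse_logs_args_py args → Pre_parse_logs_args_py args → Spec_parse_logs_args_py args (parse_logs_args_py args)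

-- ===== LEMMAS AND PROOFS =====

-- A's lookahead loop equals B's fold started with no pending marker (before the final clamp)
theorem pvLoopA_eq_foldB : ∀ (args : List String) (limit : Int) (chat upd : Option Int),
    pvLoopA args limit chat upd =
      (match args.foldl pvStepB (limit, chat, upd, none) with
       | (l, c, u, _) => (l, c, u)) := by
  intro args limit chat upd
  have hdC : PySem.Chars.strIsdigit ['c', 'h', 'a', 't'] = false := by decide
  have hdU : PySem.Chars.strIsdigit ['u', 'p', 'd', 'a', 't', 'e'] = false := by decide
  induction args, limit, chat, upd using pvLoopA.induct with
  | case1 limit chat upd => rfl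
  | case2 raw limit chat upd h ih =>
    simp only [pysem] at h
    simp [pvLoopA, pvStepB, pvDispatchB, h]
  | case3 raw limit chat upd h ih =>
    simp only [pysem] at h
    by_cases hc : PySem.Str.lower (PySem.Str.strip raw) = "chat" <;>
      by_cases hu : PySem.Str.lower (PySem.Str.strip raw) = "update" <;>
        simp [pvLoopA, pvStepB, pvDispatchB, h, hc, hu, hdC, hdU]
  | case4 raw nxt rest limit chat upd h ih =>
    simp only [pysem] at h
    simp [pvLoopA, List.foldl, pvStepB, pvDispatchB, h, ih]
  | case5 raw nxt rest limit chat upd h1 h ih =>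
    obtain ⟨htc, hv⟩ := Bool.and_eq_true_iff.mp h
    have htc' : PySem.Str.lower (PySem.Str.strip raw) = "chat" := by simpa using htc
    simp only [pysem] at h1
    simp [pvLoopA, List.foldl, pvStepB, pvDispatchB, htc', hv, ih, hdC]
  | case6 raw nxt rest limit chat upd h1 h2 h ih =>
    obtain ⟨htu, hv⟩ := Bool.and_eq_true_iff.mp h
    have htu' : PySem.Str.lower (PySem.Str.strip raw) = "update" := by simpa using htu
    simp only [pysem] at h1
    simp [pvLoopA, List.foldl, pvStepB, pvDispatchB, htu', hv, ih, hdU]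
  | case7 raw nxt rest limit chat upd h1 h2 h3 ih =>
    simp only [pysem] at h1
    by_cases hv : pvValOk nxt = true
    · have hc : ¬ (PySem.Str.lower (PySem.Str.strip raw) = "chat") := fun e => h2 (by simp [e, hv])
      have hu : ¬ (PySem.Str.lower (PySem.Str.strip raw) = "update") := fun e => h3 (by simp [e, hv])
      simp [pvLoopA, List.foldl, pvStepB, pvDispatchB, h1, hc, hu, hv, ih]
    · have hv' : pvValOk nxt = false := by simpa using hv
      by_cases hc : PySem.Str.lower (PySem.Str.strip raw) = "chat"
      · simp [pvLoopA, List.foldl, pvStepB, pvDispatchB, hc, hv', ih, hdC]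
      · by_cases hu : PySem.Str.lower (PySem.Str.strip raw) = "update"
        · simp [pvLoopA, List.foldl, pvStepB, pvDispatchB, hu, hv', ih, hdU]
        · simp [pvLoopA, List.foldl, pvStepB, pvDispatchB, h1, hc, hu, hv', ih]

-- ===== VERDICT (by name: the statement is the Claim_ definition above) =====
theorem parse_logs_args_py_spec : Claim_equal_parse_logs_args_py := by
  intro args _ _
  unfold Spec_parse_logs_args_py parse_logs_args_py parse_logs_args_py_alt
  rw [pvLoopA_eq_foldB]
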